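-- pv_equiv track=rewrite | github.com/total-impact/total-impact-webapp | totalimpactwebapp/card_generate.py | get_threshold_just_crossed
-- ===== SOURCE A (Python) =====
-- def get_threshold_just_crossed(current_value, diff_value, thresholds):
--
--     try:
--         previous_value = current_value - diff_value
--     except TypeError:
--         # not numeric
--         return None
--
--     for threshold in sorted(thresholds, reverse=True):
--         if (current_value >= threshold) and (previous_value < threshold):
--             return threshold
--     return None
-- ===== SOURCE B (Python) =====
-- def get_threshold_just_crossed(current_value, diff_value, thresholds):
--     try:
--         previous_value = current_value - diff_value
--     except TypeError:
--         # not numeric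
--         return None
--     crossed = [t for t in thresholds if current_value >= t and previous_value < t]
--     return max(crossed) if crossed else None
-- ===== Notes on version B (the rewrite author's own statement) =====
-- stated objective: simpler
-- what changed: Replaces the descending sort plus first-hit scan with a single filter of crossed thresholds followed by max (None if none crossed).
import Mathlib
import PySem

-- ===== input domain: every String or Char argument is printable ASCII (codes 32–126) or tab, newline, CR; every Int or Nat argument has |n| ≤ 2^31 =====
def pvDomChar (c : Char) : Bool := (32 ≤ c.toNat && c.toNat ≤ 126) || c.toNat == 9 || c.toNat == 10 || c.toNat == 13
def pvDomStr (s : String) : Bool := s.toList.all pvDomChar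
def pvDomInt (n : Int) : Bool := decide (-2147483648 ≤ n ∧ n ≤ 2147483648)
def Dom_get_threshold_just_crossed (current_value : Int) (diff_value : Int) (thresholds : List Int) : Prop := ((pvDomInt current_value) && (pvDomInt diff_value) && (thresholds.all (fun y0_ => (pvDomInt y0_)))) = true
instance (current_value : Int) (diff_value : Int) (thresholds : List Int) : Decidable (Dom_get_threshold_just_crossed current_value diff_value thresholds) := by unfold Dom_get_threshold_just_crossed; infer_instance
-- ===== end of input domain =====

-- B replaces A's descending sort + first-hit scan by a filter of the crossed
-- thresholds followed by max (simpler, no sort); same return value everywhere.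

-- ===== PORT A =====
-- the for-loop over sorted(thresholds, reverse=True): return the first crossed threshold
def gtjcA_loop (current_value previous_value : Int) : List Int → Option Int
  | [] => none
  | t :: rest =>
    if current_value ≥ t ∧ previous_value < t then some t
    else gtjcA_loop current_value previous_value rest

def get_threshold_just_crossed (current_value : Int) (diff_value : Int) (thresholds : List Int) : Option Int :=
  -- int - int never raises TypeError, so the except branch is dead for Int inputs
  let previous_value := current_value - diff_value
  gtjcA_loop current_value previous_value (PySem.List.sorted thresholds (fun x => x) true)

-- ===== PORT B =====
def get_threshold_just_crossed_alt (current_value : Int) (diff_value : Int) (thresholds : List Int) : Option Int :=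
  let previous_value := current_value - diff_value
  let crossed := thresholds.filter (fun t => decide (current_value ≥ t) && decide (previous_value < t))
  PySem.List.max? crossed (fun x => x)

-- ===== PRECONDITION & SPEC =====
def Spec_get_threshold_just_crossed (current_value : Int) (diff_value : Int) (thresholds : List Int) (out : Option Int) : Prop := out = get_threshold_just_crossed_alt current_value diff_value thresholds
instance (current_value : Int) (diff_value : Int) (thresholds : List Int) (out : Option Int) : Decidable (Spec_get_threshold_just_crossed current_value diff_value thresholds out) := by unfold Spec_get_threshold_just_crossed; infer_instance

-- ===== CLAIM (what is proved, stated in full; the proofs are below) =====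
def Claim_equal_get_threshold_just_crossed : Prop := ∀ (current_value : Int) (diff_value : Int) (thresholds : List Int), Dom_get_threshold_just_crossed current_value diff_value thresholds → Spec_get_threshold_just_crossed current_value diff_value thresholds (get_threshold_just_crossed current_value diff_value thresholds)

-- ===== LEMMAS AND PROOFS =====

theorem gtjcA_loop_none_iff (cv pv : Int) (l : List Int) :
    gtjcA_loop cv pv l = none ↔ ∀ t ∈ l, ¬ (cv ≥ t ∧ pv < t) := by
  induction l with
  | nil => simp [gtjcA_loop]
  | cons t rest ih =>
    simp only [gtjcA_loop]
    split_ifs with hcond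
    · simp only [false_iff, not_forall]
      exact ⟨t, List.mem_cons_self, by simpa using hcond⟩
    · rw [ih]
      constructor
      · intro hall y hy
        rcases List.mem_cons.mp hy with rfl | hy
        · exact hcond
        · exact hall y hy
      · intro hall y hy
        exact hall y (List.mem_cons_of_mem _ hy)

theorem gtjcA_loop_some (cv pv : Int) (l : List Int) (m : Int)
    (h : gtjcA_loop cv pv l = some m) :
    (cv ≥ m ∧ pv < m) ∧ m ∈ l ∧
      (l.Pairwise (fun a b => b ≤ a) → ∀ y ∈ l, (cv ≥ y ∧ pv < y) → y ≤ m) := by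
  induction l with
  | nil => simp [gtjcA_loop] at h
  | cons t rest ih =>
    simp only [gtjcA_loop] at h
    split_ifs at h with hc
    · cases h
      refine ⟨hc, List.mem_cons_self, ?_⟩
      intro hp y hy _
      rcases List.mem_cons.mp hy with rfl | hy
      · exact le_refl _
      · exact (List.pairwise_cons.mp hp).1 y hy
    · obtain ⟨h1, h2, h3⟩ := ih h
      refine ⟨h1, List.mem_cons_of_mem _ h2, ?_⟩
      intro hp y hy hpy
      rcases List.mem_cons.mp hy with rfl | hy
      · exact absurd hpy hc
      · exact h3 (List.pairwise_cons.mp hp).2 y hy hpy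

theorem get_threshold_just_crossed_spec : Claim_equal_get_threshold_just_crossed := by
  intro cv dv ths _
  unfold Spec_get_threshold_just_crossed get_threshold_just_crossed get_threshold_just_crossed_alt
  simp only []
  set pv := cv - dv with hpv
  set p : Int → Bool := fun t => decide (cv ≥ t) && decide (pv < t) with hp
  have hpiff : ∀ t : Int, p t = true ↔ (cv ≥ t ∧ pv < t) := by
    intro t; simp [hp]
  set s := PySem.List.sorted ths (fun x => x) true with hs
  have hmem : ∀ x : Int, x ∈ s ↔ x ∈ ths := fun x => PySem.List.mem_sorted ths (fun x => x) true x
  cases h : gtjcA_loop cv pv s with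
  | none =>
    have hnone := (gtjcA_loop_none_iff cv pv s).mp h
    have hfil : ths.filter p = [] := by
      apply List.filter_eq_nil_iff.mpr
      intro t ht hpt
      exact hnone t ((hmem t).mpr ht) ((hpiff t).mp hpt)
    rw [hfil]
    rfl
  | some m =>
    obtain ⟨hpm, hms, hmax⟩ := gtjcA_loop_some cv pv s m h
    have hpair : s.Pairwise (fun a b => b ≤ a) := PySem.List.sorted_pairwise_rev ths (fun x => x)
    have hmaxs := hmax hpair
    have hmths : m ∈ ths := (hmem m).mp hms
    have hmfil : m ∈ ths.filter p := List.mem_filter.mpr ⟨hmths, (hpiff m).mpr hpm⟩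
    cases hb : PySem.List.max? (ths.filter p) (fun x => x) with
    | none =>
      have : ths.filter p = [] := (PySem.List.max?_eq_none_iff _ _).mp hb
      rw [this] at hmfil
      cases hmfil
    | some m' =>
      have hm'fil : m' ∈ ths.filter p := PySem.List.max?_mem hb
      have hm'ths : m' ∈ ths := (List.mem_filter.mp hm'fil).1
      have hpm' : cv ≥ m' ∧ pv < m' := (hpiff m').mp (List.mem_filter.mp hm'fil).2
      have h1 : m ≤ m' := PySem.List.max?_isMax hb m hmfil
      have h2 : m' ≤ m := hmaxs m' ((hmem m').mpr hm'ths) hpm'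
      rw [le_antisymm h1 h2]

-- ===== VERDICT: see get_threshold_just_crossed_spec above =====
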